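-- pv_equiv track=rewrite | github.com/andrewcousins7/adventofcode | 2023/day3/code.py | get_part_number
-- ===== SOURCE A (Python) =====
-- def get_part_number(input, x, y):
--     part_number = ''
--     while input[x][y].isdigit():
--         part_number += input[x][y]
--         y += 1
--         if y >= len(input[x]):
--             break
--     return part_number
-- ===== SOURCE B (Python) =====
-- def get_part_number(input, x, y):
--     tail = input[x][y:]
--     end = next((i for i, ch in enumerate(tail) if not ch.isdigit()), len(tail))
--     return tail[:end]
-- ===== Notes on version B (the rewrite author's own statement) =====
-- stated objective: simpler
-- what changed: B replaces A's manual index-incrementing while-loop with its bounds-check break by slicing the row at y and cutting the slice at the position of its first non-digit character.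
-- intended difference: On a negative in-range y whose suffix input[x][y:] is all digits and whose row starts with a digit, A's index walk wraps past index -1 to the front of the row and returns the suffix plus the row's leading digit run again (e.g. '11' for (['1'],0,-1)), while B returns just the digit suffix ('1'), the intended maximal number read rightwards from position y. — e.g. on get_part_number(["1"], 0, -1): A returns "11", B returns "1"
import Mathlib
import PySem

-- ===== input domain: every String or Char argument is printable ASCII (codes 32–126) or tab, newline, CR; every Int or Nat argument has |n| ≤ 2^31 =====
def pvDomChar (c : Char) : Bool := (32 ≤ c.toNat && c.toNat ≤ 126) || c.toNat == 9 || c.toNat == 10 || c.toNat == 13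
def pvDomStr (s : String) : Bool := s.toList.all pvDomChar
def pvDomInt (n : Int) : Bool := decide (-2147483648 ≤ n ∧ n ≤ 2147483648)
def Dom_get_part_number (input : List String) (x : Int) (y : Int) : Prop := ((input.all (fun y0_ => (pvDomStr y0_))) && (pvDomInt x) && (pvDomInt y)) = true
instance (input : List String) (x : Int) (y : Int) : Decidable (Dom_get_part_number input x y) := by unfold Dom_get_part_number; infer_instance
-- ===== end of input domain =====

-- B replaces A's index-walking while-loop by slicing the row at y and cutting the slice at its
-- first non-digit (simpler: no manual index bookkeeping or break).  B returns a value (the digit run of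
-- the clamped slice) where A raises IndexError on an out-of-range y (outside Pre_), and on a
-- negative in-range y whose tail is all digits it does not reproduce A's wrap-around past the
-- row end (see D_).

-- ===== PORT A =====
-- the while loop of A: acc is part_number (as List Char); Chars.isdigit is exact for the
-- single ASCII character input[x][y]
def getPartLoop (row : List Char) (y : Int) (acc : List Char) : List Char :=
  match PySem.List.pyGet? row y with
  | none => acc                     -- input[x][y] raises IndexError (excluded by Pre_)
  | some c =>
    if PySem.Chars.isdigit c then
      let acc' := acc ++ [c]
      if h : y + 1 ≥ (row.length : Int) then acc'
      else getPartLoop row (y + 1) acc'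
    else acc
termination_by (((row.length : Int) - y).toNat)
decreasing_by omega

def get_part_number (input : List String) (x : Int) (y : Int) : String :=
  match PySem.List.pyGet? input x with
  | none => ""                      -- input[x] raises IndexError (excluded by Pre_)
  | some row => String.ofList (getPartLoop row.toList y [])

-- ===== PORT B =====
def get_part_number_alt (input : List String) (x : Int) (y : Int) : String :=
  match PySem.List.pyGet? input x with
  | none => ""                      -- input[x] raises IndexError (excluded by Pre_)
  | some row =>
    let tail := PySem.List.slice row.toList (some y) none        -- input[x][y:]
    -- next((i for i, ch in enumerate(tail) if not ch.isdigit()), len(tail))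
    let e := tail.findIdx (fun ch => !(PySem.Chars.isdigit ch))
    String.ofList (tail.take e)                                   -- tail[:end]

-- ===== PRECONDITION & SPEC =====
-- Pre_ excludes exactly the inputs where A raises IndexError: x out of range for input,
-- or y out of range for the row input[x].
def Pre_get_part_number (input : List String) (x : Int) (y : Int) : Prop :=
  (PySem.List.pyGet? input x).any
    (fun row => decide (PySem.Raise.InRange row.toList.length y)) = true
instance (input : List String) (x : Int) (y : Int) : Decidable (Pre_get_part_number input x y) := by
  unfold Pre_get_part_number; infer_instance

def pvWitness_get_part_number : List String × Int × Int := (["12a"], 0, 1)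

-- On a negative in-range y whose suffix input[x][y:] is all digits and whose row starts with a
-- digit, A's index walk runs past index -1 and wraps to the FRONT of the row, returning the
-- suffix plus the row's leading digit run again; B returns just the digit suffix, which is the
-- intended maximal number read rightwards from position y.
def D_get_part_number (input : List String) (x : Int) (y : Int) : Prop :=
  (PySem.List.pyGet? input x).any
    (fun row =>
      decide (y < 0) && decide (-(row.toList.length : Int) ≤ y) &&
      ((row.toList.drop ((row.toList.length : Int) + y).toNat).all PySem.Chars.isdigit) &&
      PySem.Chars.isdigit (row.toList.headD ' ')) = true
instance (input : List String) (x : Int) (y : Int) : Decidable (D_get_part_number input x y) := by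
  unfold D_get_part_number; infer_instance

def Spec_get_part_number (input : List String) (x : Int) (y : Int) (out : String) : Prop :=
  ¬ D_get_part_number input x y → out = get_part_number_alt input x y
instance (input : List String) (x : Int) (y : Int) (out : String) : Decidable (Spec_get_part_number input x y out) := by
  unfold Spec_get_part_number; infer_instance

def pvDiffWitness_get_part_number : List String × Int × Int := (["1"], 0, -1)
def pvDiffWitnessOut_get_part_number : String × String := ("11", "1")

-- ===== CLAIM (what is proved, stated in full; the proofs are below) =====
def Claim_unchanged_get_part_number : Prop := ∀ (input : List String) (x : Int) (y : Int), Dom_get_part_number input x y → Pre_get_part_number input x y → Spec_get_part_number input x y (get_part_number input x y)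
def Claim_changed_get_part_number : Prop := Dom_get_part_number (pvDiffWitness_get_part_number.1) (pvDiffWitness_get_part_number.2.1) (pvDiffWitness_get_part_number.2.2) ∧ Pre_get_part_number (pvDiffWitness_get_part_number.1) (pvDiffWitness_get_part_number.2.1) (pvDiffWitness_get_part_number.2.2) ∧ D_get_part_number (pvDiffWitness_get_part_number.1) (pvDiffWitness_get_part_number.2.1) (pvDiffWitness_get_part_number.2.2) ∧ get_part_number (pvDiffWitness_get_part_number.1) (pvDiffWitness_get_part_number.2.1) (pvDiffWitness_get_part_number.2.2) = pvDiffWitnessOut_get_part_number.1 ∧ get_part_number_alt (pvDiffWitness_get_part_number.1) (pvDiffWitness_get_part_number.2.1) (pvDiffWitness_get_part_number.2.2) = pvDiffWitnessOut_get_part_number.2 ∧ pvDiffWitnessOut_get_part_number.1 ≠ pvDiffWitnessOut_get_part_number.2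
def Claim_exact_get_part_number : Prop := ∀ (input : List String) (x : Int) (y : Int), Dom_get_part_number input x y → Pre_get_part_number input x y → D_get_part_number input x y → get_part_number input x y ≠ get_part_number_alt input x y

-- ===== LEMMAS AND PROOFS =====

-- B's cut at the first non-digit is takeWhile isdigit
theorem take_findIdx_not_digit (l : List Char) :
    l.take (l.findIdx (fun ch => !(PySem.Chars.isdigit ch))) = l.takeWhile PySem.Chars.isdigit :=
  (List.takeWhile_eq_take_findIdx_not).symm

-- A's loop from a nonnegative index j collects the digit run of (row.drop j)
theorem getPartLoop_nonneg (n : Nat) : ∀ (L : List Char) (j : Nat) (acc : List Char),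
    L.length ≤ j + n →
    getPartLoop L (j : Int) acc = acc ++ (L.drop j).takeWhile PySem.Chars.isdigit := by
  induction n with
  | zero =>
    intro L j acc h
    rw [getPartLoop]
    rw [List.drop_eq_nil_of_le (by omega)]
    simp only [PySem.List.pyGet?_natCast, List.getElem?_eq_none (by omega : L.length ≤ j)]
    simp
  | succ n ih =>
    intro L j acc h
    rw [getPartLoop]
    by_cases hj : j < L.length
    · have hget : L[j]? = some L[j] := List.getElem?_eq_getElem hj
      have hdrop : L.drop j = L[j] :: L.drop (j + 1) := List.drop_eq_getElem_cons hj
      simp only [PySem.List.pyGet?_natCast, hget]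
      by_cases hd : PySem.Chars.isdigit L[j]
      · simp only [hd, if_true]
        by_cases hend : (j : Int) + 1 ≥ (L.length : Int)
        · rw [dif_pos hend, hdrop, List.takeWhile_cons,
            List.drop_eq_nil_of_le (by omega : L.length ≤ j + 1)]
          simp [hd]
        · have hcast : (j : Int) + 1 = ((j + 1 : Nat) : Int) := by push_cast; ring
          rw [dif_neg hend, hcast, ih L (j + 1) (acc ++ [L[j]]) (by omega), hdrop,
            List.takeWhile_cons]
          simp [hd]
      · rw [if_neg hd, hdrop, List.takeWhile_cons]
        simp [hd]
    · rw [List.drop_eq_nil_of_le (by omega)]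
      simp only [PySem.List.pyGet?_natCast, List.getElem?_eq_none (by omega : L.length ≤ j)]
      simp

-- A's loop from a negative in-range index -k: the digit run of the suffix, and if that suffix
-- is all digits the walk wraps to index 0 and appends the row's leading digit run
theorem getPartLoop_neg (k : Nat) : ∀ (L : List Char) (acc : List Char),
    0 < k → k ≤ L.length →
    getPartLoop L (-(k : Int)) acc = acc ++
      (if (L.drop (L.length - k)).all PySem.Chars.isdigit then
        L.drop (L.length - k) ++ L.takeWhile PySem.Chars.isdigit
      else (L.drop (L.length - k)).takeWhile PySem.Chars.isdigit) := by
  induction k with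
  | zero => intro L acc h; omega
  | succ k ih =>
    intro L acc hk hlen
    have hidx : L.length - (k + 1) < L.length := by omega
    have hget : PySem.List.pyGet? L (-((k + 1 : Nat) : Int)) = some L[L.length - (k + 1)] := by
      rw [PySem.List.pyGet?_neg_natCast L (k + 1) (by omega) hlen]
      exact List.getElem?_eq_getElem hidx
    have hdrop : L.drop (L.length - (k + 1)) = L[L.length - (k + 1)] :: L.drop (L.length - k) := by
      rw [List.drop_eq_getElem_cons hidx, show L.length - (k + 1) + 1 = L.length - k from by omega]
    rw [getPartLoop, hget]
    simp only
    by_cases hd : PySem.Chars.isdigit L[L.length - (k + 1)]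
    · simp only [hd, if_true]
      have hnend : ¬ (-((k + 1 : Nat) : Int) + 1 ≥ (L.length : Int)) := by push_cast; omega
      rw [dif_neg hnend]
      rcases Nat.eq_zero_or_pos k with hk0 | hkpos
      · subst hk0
        have hcast : -((0 + 1 : Nat) : Int) + 1 = ((0 : Nat) : Int) := by omega
        have hnil : L.drop (L.length - 0) = [] := List.drop_eq_nil_of_le (by omega)
        rw [hcast, getPartLoop_nonneg L.length L 0 _ (by omega), hdrop, hnil]
        simp [hd]
      · have hcast : -((k + 1 : Nat) : Int) + 1 = -((k : Nat) : Int) := by omega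
        rw [hcast, ih L _ hkpos (by omega), hdrop]
        by_cases hall : (L.drop (L.length - k)).all PySem.Chars.isdigit
        · simp [hall, hd]
        · simp [hall, hd]
    · rw [if_neg hd, hdrop, List.takeWhile_cons]
      simp [hd]

-- B's value for a valid index y (as a list)
theorem alt_toList_neg (row : List Char) (y : Int) (hy : y < 0) :
    (PySem.List.slice row (some y) none).take
      ((PySem.List.slice row (some y) none).findIdx (fun ch => !(PySem.Chars.isdigit ch)))
    = (row.drop (row.length - (-y).toNat)).takeWhile PySem.Chars.isdigit := by
  rw [take_findIdx_not_digit,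
    show y = -(((-y).toNat : Nat) : Int) from by omega,
    PySem.List.slice_from_neg_natCast row (-y).toNat (by omega)]
  congr 3
  omega

-- ===== VERDICT (by name: the statement is the Claim_ definition above) =====
theorem get_part_number_spec : Claim_unchanged_get_part_number := by
  unfold Claim_unchanged_get_part_number
  intro input x y _ hpre
  unfold Spec_get_part_number
  intro hD
  unfold get_part_number get_part_number_alt
  cases hrow : PySem.List.pyGet? input x with
  | none => rfl
  | some row =>
    simp only
    rw [String.ofList_inj]
    set L := row.toList with hL
    unfold Pre_get_part_number at hpre
    rw [hrow] at hpre
    simp only [Option.any_some, decide_eq_true_eq, PySem.Raise.InRange, ← hL] at hpre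
    obtain ⟨hlo, hhi⟩ := hpre
    by_cases hy : 0 ≤ y
    · rw [take_findIdx_not_digit, PySem.List.slice_from L hy,
        show y = ((y.toNat : Nat) : Int) from by omega,
        getPartLoop_nonneg L.length L y.toNat [] (by omega)]
      simp only [List.nil_append]
      congr 3
      omega
    · -- negative in-range y; ¬D_ rules out the all-digit wrap-around case
      unfold D_get_part_number at hD
      rw [hrow] at hD
      simp only [Option.any_some, Bool.and_eq_true, decide_eq_true_eq, not_and, ← hL] at hD
      set k : Nat := (-y).toNat with hkdef
      rw [alt_toList_neg L y (by omega), ← hkdef,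
        show y = -((k : Nat) : Int) from by omega,
        getPartLoop_neg k L [] (by omega) (by omega)]
      by_cases hall : (L.drop (L.length - k)).all PySem.Chars.isdigit
      · -- suffix all digits: ¬D_ forces the head to be a non-digit, so the wrapped run is empty
        have hd : ¬ (PySem.Chars.isdigit (L.headD ' ') = true) := by
          intro hd
          have hjk : ((L.length : Int) + y).toNat = L.length - k := by omega
          have := hD ⟨⟨by omega, by omega⟩, by rw [hjk]; exact hall⟩
          exact this hd
        have htw : L.takeWhile PySem.Chars.isdigit = [] := by
          cases hLc : L with
          | nil => rfl
          | cons c t =>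
            rw [hLc] at hd
            simp only [List.headD_cons] at hd
            simp [hd]
        rw [if_pos hall, htw, List.append_nil, List.nil_append,
          List.takeWhile_eq_self_iff.mpr (by simpa [List.all_eq_true] using hall)]
      · rw [if_neg hall, List.nil_append]

theorem get_part_number_changed : Claim_changed_get_part_number := by
  unfold Claim_changed_get_part_number
  refine ⟨by decide, by decide, by decide, ?_, by decide, by decide⟩
  show get_part_number ["1"] 0 (-1) = "11"
  have h1 : getPartLoop ['1'] (-1) [] = ['1', '1'] := by
    rw [show (-1 : Int) = -((1 : Nat) : Int) from by norm_num,
      getPartLoop_neg 1 ['1'] [] (by omega) (by decide)]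
    decide
  have h0 : PySem.List.pyGet? ["1"] (0 : Int) = some "1" := by decide
  simp only [get_part_number, h0, show ("1" : String).toList = ['1'] from by decide, h1]

theorem get_part_number_tight : Claim_exact_get_part_number := by
  unfold Claim_exact_get_part_number
  intro input x y _ _ hD
  unfold get_part_number get_part_number_alt
  cases hrow : PySem.List.pyGet? input x with
  | none => unfold D_get_part_number at hD; rw [hrow] at hD; simp at hD
  | some row =>
    simp only
    set L := row.toList with hL
    unfold D_get_part_number at hD
    rw [hrow] at hD
    simp only [Option.any_some, Bool.and_eq_true, decide_eq_true_eq, ← hL] at hD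
    obtain ⟨⟨⟨hy, hlo⟩, hall⟩, hd⟩ := hD
    set k : Nat := (-y).toNat with hkdef
    have hjk : ((L.length : Int) + y).toNat = L.length - k := by omega
    rw [hjk] at hall
    intro heq
    rw [String.ofList_inj] at heq
    rw [alt_toList_neg L y (by omega), ← hkdef,
      List.takeWhile_eq_self_iff.mpr (by simpa [List.all_eq_true] using hall),
      show y = -((k : Nat) : Int) from by omega,
      getPartLoop_neg k L [] (by omega) (by omega), if_pos hall] at heq
    have hlen := congrArg List.length heq
    have htwpos : 0 < (L.takeWhile PySem.Chars.isdigit).length := by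
      cases hLc : L with
      | nil =>
        rw [hLc] at hlo
        simp at hlo
        omega
      | cons c t =>
        rw [hLc] at hd
        simp only [List.headD_cons] at hd
        simp [hd]
    simp only [List.nil_append, List.length_append, List.length_drop] at hlen
    omega
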